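-- pv_equiv track=rewrite | github.com/netor27/codefights-arcade-solutions | python/arcade-theCore/06_LabyrinthOfNestedLoops/050_CrosswordFormation.py | sumOfCombinations
-- ===== SOURCE A (Python) =====
-- def sumOfCombinations(left, up, right, bottom):
--     lset = set(left)
--     rset = set(right)
--     uset = set(up)
--     bset = set(bottom)
--     r = 0
--     for l1 in range(len(left) - 2):
--         if left[l1] in uset:
--             for u1 in range(len(up) - 2):
--                 if left[l1] == up[u1]:
--                     # we found a letter that match between left and up
--                     # now, check from u1+2 till the end to find matches with right
--                     for u2 in range(u1 + 2, len(up)):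
--                         if up[u2] in rset:
--                             for r1 in range(len(right) - 2):
--                                 if up[u2] == right[r1]:
--                                     # we found a letter that match between up and right
--                                     # now, check from r1+2 till the end to find matches with bottom
--                                     for r2 in range(r1 + 2, len(right)):
--                                         if right[r2] in bset:
--                                             for b1 in range(u2 - u1, len(bottom)):
--                                                 if right[r2] == bottom[b1]:
--                                                     # we found a letter that matches with bottom
--                                                     # now, check if by positioning bottom like this, it matches with left
--                                                     # first check if the positioning of b at least covers the distance of upper
--                                                     width = u2 - u1
--                                                     height = r2 - r1
--                                                     if b1 - width >= 0 and l1 + height < len(left):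
--                                                         if left[l1 + height] == bottom[b1 - width]:
--                                                             r += 1
--     return r
-- ===== SOURCE B (Python) =====
-- def sumOfCombinations(left, up, right, bottom):
--     # Count the same formations per (width, height): build char-pair count
--     # tables for each offset once, then contract the four tables.
--     def paircnt(s, d):
--         cnt = {}
--         for i in range(len(s) - d):
--             k = (s[i], s[i + d])
--             cnt[k] = cnt.get(k, 0) + 1
--         return cnt
--
--     ws = range(2, len(up))
--     hs = range(2, len(right))
--     ups = [paircnt(up, w) for w in ws]
--     bots = [paircnt(bottom, w) for w in ws]
--     lefts = [paircnt(left, h) for h in hs]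
--     rights = [paircnt(right, h) for h in hs]
--     total = 0
--     for U, B in zip(ups, bots):
--         for R, L in zip(rights, lefts):
--             for (c1, c2), nu in U.items():
--                 for (c4, c3), nb in B.items():
--                     total += nu * nb * L.get((c1, c4), 0) * R.get((c2, c3), 0)
--     return total
-- ===== Notes on version B (the rewrite author's own statement) =====
-- stated objective: faster
-- what changed: Instead of six nested position loops, B builds, for every width and height offset, dictionaries counting (first char, second char) pairs at that offset in each of the four words, and sums products of the four pair counts over the realized corner-character combinations.
import Mathlib
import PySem

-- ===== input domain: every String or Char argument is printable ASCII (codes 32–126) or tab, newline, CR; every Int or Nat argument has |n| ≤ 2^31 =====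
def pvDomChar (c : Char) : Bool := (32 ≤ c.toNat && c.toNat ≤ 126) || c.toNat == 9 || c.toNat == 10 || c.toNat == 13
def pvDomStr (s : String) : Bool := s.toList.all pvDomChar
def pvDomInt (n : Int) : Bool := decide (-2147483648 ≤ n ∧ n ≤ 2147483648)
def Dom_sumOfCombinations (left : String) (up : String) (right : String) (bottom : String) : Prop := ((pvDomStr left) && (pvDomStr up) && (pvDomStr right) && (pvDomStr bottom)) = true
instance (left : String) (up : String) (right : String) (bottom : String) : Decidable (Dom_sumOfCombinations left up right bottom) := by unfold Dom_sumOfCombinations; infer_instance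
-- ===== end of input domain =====

-- B replaces A's six nested position loops by per-offset char-pair count tables,
-- contracted per (width, height); objective: faster.

-- ===== PORT A =====
-- literal transliteration of A; indexing uses pyGetD (every index A reads is in range)
def sumOfCombinations (left : String) (up : String) (right : String) (bottom : String) : Int :=
  let L := left.toList
  let U := up.toList
  let R := right.toList
  let B := bottom.toList
  let _lset := PySem.Set.ofList L
  let rset := PySem.Set.ofList R
  let uset := PySem.Set.ofList U
  let bset := PySem.Set.ofList B
  (PySem.List.pyRange 0 ((L.length : Int) - 2) 1).foldl (fun r l1 =>
    if PySem.List.pyGetD L l1 ' ' ∈ uset then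
      (PySem.List.pyRange 0 ((U.length : Int) - 2) 1).foldl (fun r u1 =>
        if PySem.List.pyGetD L l1 ' ' = PySem.List.pyGetD U u1 ' ' then
          (PySem.List.pyRange (u1 + 2) (U.length : Int) 1).foldl (fun r u2 =>
            if PySem.List.pyGetD U u2 ' ' ∈ rset then
              (PySem.List.pyRange 0 ((R.length : Int) - 2) 1).foldl (fun r r1 =>
                if PySem.List.pyGetD U u2 ' ' = PySem.List.pyGetD R r1 ' ' then
                  (PySem.List.pyRange (r1 + 2) (R.length : Int) 1).foldl (fun r r2 =>
                    if PySem.List.pyGetD R r2 ' ' ∈ bset then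
                      (PySem.List.pyRange (u2 - u1) (B.length : Int) 1).foldl (fun r b1 =>
                        if PySem.List.pyGetD R r2 ' ' = PySem.List.pyGetD B b1 ' ' then
                          let width := u2 - u1
                          let height := r2 - r1
                          if b1 - width ≥ 0 ∧ l1 + height < (L.length : Int) then
                            if PySem.List.pyGetD L (l1 + height) ' ' = PySem.List.pyGetD B (b1 - width) ' ' then
                              r + 1
                            else r
                          else r
                        else r) r
                    else r) r
                else r) r
            else r) r
        else r) r
    else r) 0


-- ===== PORT B =====
-- helper of B: pair-count dictionary of (s[i], s[i+d]) for i in range(len(s)-d)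
def pvPairCnt (s : List Char) (d : Int) : PySem.Dict (Char × Char) Int :=
  (PySem.List.pyRange 0 ((s.length : Int) - d) 1).foldl
    (fun cnt i =>
      let k := (PySem.List.pyGetD s i ' ', PySem.List.pyGetD s (i + d) ' ')
      cnt.insert k (cnt.getD k 0 + 1))
    PySem.Dict.empty


def sumOfCombinations_alt (left : String) (up : String) (right : String) (bottom : String) : Int :=
  let L := left.toList
  let U := up.toList
  let R := right.toList
  let B := bottom.toList
  let ws := PySem.List.pyRange 2 (U.length : Int) 1
  let hs := PySem.List.pyRange 2 (R.length : Int) 1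
  let ups := ws.map (fun w => pvPairCnt U w)
  let bots := ws.map (fun w => pvPairCnt B w)
  let lefts := hs.map (fun h => pvPairCnt L h)
  let rights := hs.map (fun h => pvPairCnt R h)
  (ups.zip bots).foldl (fun total ub =>
    (rights.zip lefts).foldl (fun total rl =>
      ub.1.items.foldl (fun total p =>
        ub.2.items.foldl (fun total q =>
          total + p.2 * q.2 * (rl.2.getD (p.1.1, q.1.1) 0) * (rl.1.getD (p.1.2, q.1.2) 0)) total) total) total) 0


-- ===== PRECONDITION & SPEC =====
def Spec_sumOfCombinations (left : String) (up : String) (right : String) (bottom : String) (out : Int) : Prop := out = sumOfCombinations_alt left up right bottom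
instance (left : String) (up : String) (right : String) (bottom : String) (out : Int) : Decidable (Spec_sumOfCombinations left up right bottom out) := by unfold Spec_sumOfCombinations; infer_instance

-- ===== CLAIM (what is proved, stated in full; the proofs are below) =====
def Claim_equal_sumOfCombinations : Prop := ∀ (left : String) (up : String) (right : String) (bottom : String), Dom_sumOfCombinations left up right bottom → Spec_sumOfCombinations left up right bottom (sumOfCombinations left up right bottom)

-- ===== LEMMAS AND PROOFS =====

def pvI (p : Prop) [Decidable p] : Int := if p then 1 else 0

lemma pvI_and (p q : Prop) [Decidable p] [Decidable q] : pvI (p ∧ q) = pvI p * pvI q := by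
  unfold pvI; split_ifs <;> simp_all

lemma pvSumIcoAux (b : Int) (f : Int → Int) : ∀ (n : Nat) (a : Int), (b - a).toNat = n →
    ((PySem.List.pyRange a b 1).map f).sum = ∑ x ∈ Finset.Ico a b, f x := by
  intro n
  induction n with
  | zero =>
    intro a h
    rw [PySem.List.pyRange_one_eq_nil (by omega), Finset.Ico_eq_empty (by omega)]
    simp
  | succ n ih =>
    intro a h
    rw [PySem.List.pyRange_one_cons (by omega)]
    have hins : Finset.Ico a b = insert a (Finset.Ico (a+1) b) := by
      ext x; simp only [Finset.mem_Ico, Finset.mem_insert]; omega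
    rw [hins, Finset.sum_insert (by simp only [Finset.mem_Ico]; omega)]
    simp only [List.map_cons, List.sum_cons]
    rw [ih (a+1) (by omega)]

lemma pvSumIco (a b : Int) (f : Int → Int) :
    ((PySem.List.pyRange a b 1).map f).sum = ∑ x ∈ Finset.Ico a b, f x :=
  pvSumIcoAux b f _ a rfl

lemma pvShift (a b c : Int) (f : Int → Int) :
    ∑ x ∈ Finset.Ico (c + a) (c + b), f x = ∑ w ∈ Finset.Ico a b, f (c + w) := by
  rw [← Finset.map_add_left_Ico, Finset.sum_map]
  rfl

lemma pvTriInner (n w : Int) (g : Int → Int) (hw : 0 ≤ w) :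
    ∑ u ∈ Finset.Ico (0:Int) (n - w), g u
      = ∑ u ∈ Finset.Ico (0:Int) n, if u + w < n then g u else 0 := by
  rw [Finset.sum_congr rfl (g := fun u => if u + w < n then g u else 0)
      (fun u hu => (if_pos (show u + w < n by simp only [Finset.mem_Ico] at hu; omega)).symm)]
  exact Finset.sum_subset (Finset.Ico_subset_Ico le_rfl (by omega))
    (fun u hu hnu => by
      rw [if_neg]
      simp only [Finset.mem_Ico] at hu hnu
      omega)

lemma pvTri (n : Int) (f : Int → Int → Int) :
    ∑ u ∈ Finset.Ico (0:Int) (n - 2), ∑ w ∈ Finset.Ico (2:Int) (n - u), f u w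
      = ∑ w ∈ Finset.Ico (2:Int) n, ∑ u ∈ Finset.Ico (0:Int) (n - w), f u w := by
  have hL : ∀ u : Int, 0 ≤ u →
      ∑ w ∈ Finset.Ico (2:Int) (n - u), f u w
        = ∑ w ∈ Finset.Ico (2:Int) n, if u + w < n then f u w else 0 := by
    intro u hu
    rw [Finset.sum_congr rfl (g := fun w => if u + w < n then f u w else 0)
        (fun w hw => (if_pos (show u + w < n by simp only [Finset.mem_Ico] at hw; omega)).symm)]
    exact Finset.sum_subset (Finset.Ico_subset_Ico le_rfl (by omega))
      (fun w hw hnw => by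
        rw [if_neg]
        simp only [Finset.mem_Ico] at hw hnw
        omega)
  calc ∑ u ∈ Finset.Ico (0:Int) (n - 2), ∑ w ∈ Finset.Ico (2:Int) (n - u), f u w
      = ∑ u ∈ Finset.Ico (0:Int) (n - 2), ∑ w ∈ Finset.Ico (2:Int) n, if u + w < n then f u w else 0 :=
        Finset.sum_congr rfl (fun u hu => hL u (by simp only [Finset.mem_Ico] at hu; omega))
    _ = ∑ u ∈ Finset.Ico (0:Int) n, ∑ w ∈ Finset.Ico (2:Int) n, if u + w < n then f u w else 0 := by
        refine Finset.sum_subset (Finset.Ico_subset_Ico le_rfl (by omega)) (fun u hu hnu => ?_)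
        refine Finset.sum_eq_zero (fun w hw => ?_)
        rw [if_neg]
        simp only [Finset.mem_Ico] at hu hnu hw
        omega
    _ = ∑ w ∈ Finset.Ico (2:Int) n, ∑ u ∈ Finset.Ico (0:Int) n, if u + w < n then f u w else 0 :=
        Finset.sum_comm
    _ = ∑ w ∈ Finset.Ico (2:Int) n, ∑ u ∈ Finset.Ico (0:Int) (n - w), f u w :=
        Finset.sum_congr rfl (fun w hw => by
          rw [pvTriInner n w (f · w) (by simp only [Finset.mem_Ico] at hw; omega)])

def pvPairs (s : List Char) (d : Int) : List (Char × Char) :=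
  (PySem.List.pyRange 0 ((s.length : Int) - d) 1).map
    (fun i => (PySem.List.pyGetD s i ' ', PySem.List.pyGetD s (i + d) ' '))

lemma pvPairCnt_eq_counter (s : List Char) (d : Int) :
    pvPairCnt s d = PySem.Dict.counter (pvPairs s d) := by
  unfold pvPairCnt pvPairs
  rw [← PySem.Dict.foldl_insert_getD_add_one_eq_counter, List.foldl_map]

lemma pvCountInst (m : Char × Char) (xs : List (Char × Char)) :
    @List.count _ instBEqProd m xs = @List.count _ instBEqOfDecidableEq m xs := by
  induction xs with
  | nil => rfl
  | cons c t ih => simp only [List.count_cons, ih, beq_iff_eq]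

lemma pvSumItems (xs : List (Char × Char)) (g : Char × Char → Int) :
    ((PySem.Dict.counter xs).items.map (fun p => p.2 * g p.1)).sum = (xs.map g).sum := by
  rw [PySem.Dict.items_counter, List.map_map]
  have h1 : (PySem.Set.ofList xs).toFinset = xs.toFinset := by
    ext y; simp [PySem.Set.mem_ofList]
  calc ((PySem.Set.ofList xs).map ((fun p => p.2 * g p.1) ∘ (fun k => (k, (List.count k xs : Int))))).sum
      = ((PySem.Set.ofList xs).map (fun k => (List.count k xs : Int) * g k)).sum := rfl
    _ = (PySem.Set.ofList xs).toFinset.sum (fun k => (List.count k xs : Int) * g k) :=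
        (List.sum_toFinset _ (PySem.Set.nodup_ofList xs)).symm
    _ = ∑ m ∈ xs.toFinset, (List.count m xs : Int) * g m := by rw [h1]
    _ = ∑ m ∈ xs.toFinset, @List.count _ instBEqOfDecidableEq m xs • g m := by
        refine Finset.sum_congr rfl (fun m _ => ?_)
        rw [nsmul_eq_mul, pvCountInst]
    _ = (xs.map g).sum := (Finset.sum_list_map_count xs g).symm

lemma pvI_congr {p q : Prop} [Decidable p] [Decidable q] (h : p ↔ q) : pvI p = pvI q := by
  unfold pvI; split_ifs <;> tauto

lemma pvI_pair (a b : Char) (k : Char × Char) :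
    pvI ((a, b) = k) = pvI (a = k.1) * pvI (b = k.2) := by
  rw [← pvI_and]
  exact pvI_congr (by constructor <;> intro h <;> [exact ⟨congrArg Prod.fst h, congrArg Prod.snd h⟩; exact Prod.ext h.1 h.2])

lemma pvCountMap (l : List Int) (key : Int → Char × Char) (k : Char × Char) :
    (((l.map key).count k : Nat) : Int) = (l.map (fun x => pvI (key x = k))).sum := by
  induction l with
  | nil => rfl
  | cons a t ih =>
    simp only [List.map_cons, List.count_cons, List.sum_cons, beq_iff_eq, pvI]
    split_ifs <;> push_cast <;> rw [ih] <;> exact add_comm _ _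

lemma pvCountPairs (s : List Char) (d : Int) (k : Char × Char) :
    (((pvPairs s d).count k : Nat) : Int)
      = ∑ x ∈ Finset.Ico (0:Int) ((s.length : Int) - d),
          pvI (PySem.List.pyGetD s x ' ' = k.1) * pvI (PySem.List.pyGetD s (x + d) ' ' = k.2) := by
  rw [← pvSumIco]
  unfold pvPairs
  rw [pvCountMap]
  rw [show (fun x => pvI ((PySem.List.pyGetD s x ' ', PySem.List.pyGetD s (x + d) ' ') = k))
        = (fun x => pvI (PySem.List.pyGetD s x ' ' = k.1) * pvI (PySem.List.pyGetD s (x + d) ' ' = k.2))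
      from funext fun x => pvI_pair _ _ k]

noncomputable def pvT (L U R B : List Char) (w h i j l r : Int) : Int :=
  pvI (PySem.List.pyGetD L l ' ' = PySem.List.pyGetD U i ' ') *
  (pvI (PySem.List.pyGetD L (l + h) ' ' = PySem.List.pyGetD B j ' ') *
   (pvI (PySem.List.pyGetD R r ' ' = PySem.List.pyGetD U (i + w) ' ') *
    pvI (PySem.List.pyGetD R (r + h) ' ' = PySem.List.pyGetD B (j + w) ' ')))

lemma pvDoubleItems (A B : List (Char × Char)) (F : Char × Char → Char × Char → Int) (t0 : Int) :
    ((PySem.Dict.counter A).items.foldl (fun total p =>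
       (PySem.Dict.counter B).items.foldl (fun total q =>
         total + p.2 * q.2 * F p.1 q.1) total) t0)
    = t0 + (A.map (fun a => (B.map (fun b => F a b)).sum)).sum := by
  simp only [PySem.List.foldl_add]
  congr 1
  rw [show (fun p : (Char × Char) × Int =>
        ((PySem.Dict.counter B).items.map (fun q => p.2 * q.2 * F p.1 q.1)).sum)
      = (fun p : (Char × Char) × Int =>
        p.2 * (((PySem.Dict.counter B).items.map (fun q => q.2 * F p.1 q.1)).sum)) from
      funext fun p => by
        rw [← List.sum_map_mul_left]
        exact congrArg List.sum (List.map_congr_left fun q _ => by ring)]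
  rw [pvSumItems A (fun k => (List.map (fun q => q.2 * F k q.1) (PySem.Dict.counter B).items).sum)]
  exact congrArg List.sum (List.map_congr_left fun a _ => pvSumItems B (F a))

lemma pvBlockSum (Lc Uc Rc Bc : List Char) (w h : Int) (t0 : Int) :
    ((pvPairCnt Uc w).items.foldl (fun total p =>
       (pvPairCnt Bc w).items.foldl (fun total q =>
         total + p.2 * q.2 * ((pvPairCnt Lc h).getD (p.1.1, q.1.1) 0) * ((pvPairCnt Rc h).getD (p.1.2, q.1.2) 0)) total) t0)
    = t0 + ∑ i ∈ Finset.Ico (0:Int) ((Uc.length : Int) - w),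
        ∑ j ∈ Finset.Ico (0:Int) ((Bc.length : Int) - w),
        ∑ l ∈ Finset.Ico (0:Int) ((Lc.length : Int) - h),
        ∑ r ∈ Finset.Ico (0:Int) ((Rc.length : Int) - h), pvT Lc Uc Rc Bc w h i j l r := by
  rw [pvPairCnt_eq_counter Uc w, pvPairCnt_eq_counter Bc w]
  rw [show (fun (total : Int) (p : (Char × Char) × Int) =>
        ((PySem.Dict.counter (pvPairs Bc w)).items.foldl (fun total q =>
          total + p.2 * q.2 * ((pvPairCnt Lc h).getD (p.1.1, q.1.1) 0) * ((pvPairCnt Rc h).getD (p.1.2, q.1.2) 0)) total))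
      = (fun (total : Int) (p : (Char × Char) × Int) =>
        ((PySem.Dict.counter (pvPairs Bc w)).items.foldl (fun total q =>
          total + p.2 * q.2 * (((pvPairCnt Lc h).getD (p.1.1, q.1.1) 0) * ((pvPairCnt Rc h).getD (p.1.2, q.1.2) 0))) total)) from
      funext fun total => funext fun p => by congr 1; funext t q; ring]
  rw [pvDoubleItems (pvPairs Uc w) (pvPairs Bc w)
      (fun a b => ((pvPairCnt Lc h).getD (a.1, b.1) 0) * ((pvPairCnt Rc h).getD (a.2, b.2) 0)) t0]
  congr 1
  unfold pvPairs
  simp only [List.map_map]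
  rw [pvSumIco]
  refine Finset.sum_congr rfl (fun i _ => ?_)
  simp only [Function.comp_def]
  rw [pvSumIco]
  refine Finset.sum_congr rfl (fun j _ => ?_)
  rw [pvPairCnt_eq_counter Lc h, pvPairCnt_eq_counter Rc h,
      PySem.Dict.getD_counter, PySem.Dict.getD_counter, pvCountPairs, pvCountPairs,
      Finset.sum_mul_sum]
  refine Finset.sum_congr rfl (fun l _ => Finset.sum_congr rfl (fun r _ => ?_))
  unfold pvT
  ring

lemma pvIte (c : Prop) [Decidable c] (r t : Int) : (if c then r + t else r) = r + pvI c * t := by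
  unfold pvI; split_ifs <;> ring


noncomputable def pvN (L U R B : List Char) : Int :=
  ∑ w ∈ Finset.Ico (2 : Int) (U.length : Int),
  ∑ h ∈ Finset.Ico (2 : Int) (R.length : Int),
  ∑ i ∈ Finset.Ico (0 : Int) ((U.length : Int) - w),
  ∑ j ∈ Finset.Ico (0 : Int) ((B.length : Int) - w),
  ∑ l ∈ Finset.Ico (0 : Int) ((L.length : Int) - h),
  ∑ r ∈ Finset.Ico (0 : Int) ((R.length : Int) - h),
    pvT L U R B w h i j l r


theorem pvB_eq_pvN (left up right bottom : String) :
    sumOfCombinations_alt left up right bottom =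
      pvN left.toList up.toList right.toList bottom.toList := by
  unfold pvN
  simp only [sumOfCombinations_alt, List.zip_map', List.foldl_map]
  simp only [pvBlockSum]
  simp only [PySem.List.foldl_add, zero_add]
  rw [pvSumIco]
  refine Finset.sum_congr rfl (fun w _ => ?_)
  rw [pvSumIco]


lemma pvI_comm (a b : Char) : pvI (a = b) = pvI (b = a) := pvI_congr eq_comm

lemma pvGuardMem (c : Char) (s : List Char) (a b : Int) (ha : 0 ≤ a) (hb : b ≤ (s.length : Int))
    (F : Int → Int) :
    pvI (c ∈ PySem.Set.ofList s) * (∑ x ∈ Finset.Ico a b, pvI (c = PySem.List.pyGetD s x ' ') * F x)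
      = ∑ x ∈ Finset.Ico a b, pvI (c = PySem.List.pyGetD s x ' ') * F x := by
  by_cases h : c ∈ PySem.Set.ofList s
  · rw [pvI, if_pos h, one_mul]
  · rw [pvI, if_neg h, zero_mul]
    symm
    refine Finset.sum_eq_zero (fun x hx => ?_)
    simp only [Finset.mem_Ico] at hx
    have hmem : PySem.List.pyGetD s x ' ' ∈ s :=
      PySem.List.pyGetD_mem s ' ' (by unfold PySem.Raise.InRange; omega)
    have hne : ¬ (c = PySem.List.pyGetD s x ' ') := fun he => h (by
      rw [PySem.Set.mem_ofList]; exact he ▸ hmem)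
    rw [pvI, if_neg hne, zero_mul]

lemma pvLfix (lam h : Int) (hh : 2 ≤ h) (g : Int → Int) :
    ∑ l ∈ Finset.Ico (0:Int) (lam - 2), pvI (l + h < lam) * g l
      = ∑ l ∈ Finset.Ico (0:Int) (lam - h), g l := by
  calc ∑ l ∈ Finset.Ico (0:Int) (lam - 2), pvI (l + h < lam) * g l
      = ∑ l ∈ Finset.Ico (0:Int) (lam - h), pvI (l + h < lam) * g l := by
        symm
        refine Finset.sum_subset (Finset.Ico_subset_Ico le_rfl (by omega)) (fun l hl hnl => ?_)
        simp only [Finset.mem_Ico] at hl hnl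
        simp only [pvI]
        rw [if_neg (by omega), zero_mul]
    _ = ∑ l ∈ Finset.Ico (0:Int) (lam - h), g l :=
        Finset.sum_congr rfl (fun l hl => by
          simp only [pvI]
          rw [if_pos (by simp only [Finset.mem_Ico] at hl; omega), one_mul])

lemma pvInner6 (B : List Char) (a : Int) (c e : Char) (P : Prop) [Decidable P] :
    ∑ b1 ∈ Finset.Ico a (B.length : Int),
        pvI (c = PySem.List.pyGetD B b1 ' ') *
          (pvI (b1 - a ≥ 0 ∧ P) * (pvI (e = PySem.List.pyGetD B (b1 - a) ' ') * 1))
      = pvI P * ∑ j ∈ Finset.Ico (0:Int) ((B.length : Int) - a),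
          pvI (c = PySem.List.pyGetD B (a + j) ' ') * pvI (e = PySem.List.pyGetD B j ' ') := by
  rw [show Finset.Ico a (B.length : Int) = Finset.Ico (a + 0) (a + ((B.length : Int) - a)) by
      congr 1 <;> ring, pvShift, Finset.mul_sum]
  refine Finset.sum_congr rfl (fun j hj => ?_)
  simp only [Finset.mem_Ico] at hj
  rw [show a + j - a = j by ring]
  rw [show pvI (j ≥ 0 ∧ P) = pvI P from pvI_congr (and_iff_right (by omega))]
  ring


lemma pvStepB (L R B : List Char) (l1 a r1 : Int) (ha : 0 ≤ a) :
    ∑ r2 ∈ Finset.Ico (r1 + 2) ((R.length : Int)),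
        pvI (PySem.List.pyGetD R r2 ' ' ∈ PySem.Set.ofList B) *
          ∑ b1 ∈ Finset.Ico a ((B.length : Int)),
            pvI (PySem.List.pyGetD R r2 ' ' = PySem.List.pyGetD B b1 ' ') *
              (pvI (b1 - a ≥ 0 ∧ l1 + (r2 - r1) < (L.length : Int)) *
                (pvI (PySem.List.pyGetD L (l1 + (r2 - r1)) ' ' = PySem.List.pyGetD B (b1 - a) ' ') * 1))
      = ∑ h ∈ Finset.Ico (2:Int) ((R.length : Int) - r1),
          pvI (l1 + h < (L.length : Int)) *
            ∑ j ∈ Finset.Ico (0:Int) ((B.length : Int) - a),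
              pvI (PySem.List.pyGetD R (r1 + h) ' ' = PySem.List.pyGetD B (a + j) ' ') *
                pvI (PySem.List.pyGetD L (l1 + h) ' ' = PySem.List.pyGetD B j ' ') := by
  rw [show Finset.Ico (r1 + 2) ((R.length : Int)) = Finset.Ico (r1 + 2) (r1 + ((R.length : Int) - r1)) by
      congr 1; ring, pvShift]
  refine Finset.sum_congr rfl (fun h hh => ?_)
  rw [show r1 + h - r1 = h by ring]
  rw [pvGuardMem _ B a _ ha le_rfl]
  exact pvInner6 B a _ _ _

lemma pvStepU (U R : List Char) (u1 : Int) (G : Int → Int → Int) :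
    ∑ u2 ∈ Finset.Ico (u1 + 2) ((U.length : Int)),
        pvI (PySem.List.pyGetD U u2 ' ' ∈ PySem.Set.ofList R) *
          ∑ r1 ∈ Finset.Ico (0:Int) ((R.length : Int) - 2),
            pvI (PySem.List.pyGetD U u2 ' ' = PySem.List.pyGetD R r1 ' ') * G r1 (u2 - u1)
      = ∑ w ∈ Finset.Ico (2:Int) ((U.length : Int) - u1),
          ∑ r1 ∈ Finset.Ico (0:Int) ((R.length : Int) - 2),
            pvI (PySem.List.pyGetD U (u1 + w) ' ' = PySem.List.pyGetD R r1 ' ') * G r1 w := by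
  rw [show Finset.Ico (u1 + 2) ((U.length : Int)) = Finset.Ico (u1 + 2) (u1 + ((U.length : Int) - u1)) by
      congr 1; ring, pvShift]
  refine Finset.sum_congr rfl (fun w hw => ?_)
  rw [show u1 + w - u1 = w by ring]
  exact pvGuardMem _ R 0 _ le_rfl (by omega) _


lemma pvRearrange (lam mu rho beta : Int) (T : Int → Int → Int → Int → Int → Int → Int) :
    (∑ l ∈ Finset.Ico (0:Int) (lam - 2), ∑ u ∈ Finset.Ico (0:Int) (mu - 2),
      ∑ w ∈ Finset.Ico (2:Int) (mu - u), ∑ r ∈ Finset.Ico (0:Int) (rho - 2),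
      ∑ h ∈ Finset.Ico (2:Int) (rho - r),
        pvI (l + h < lam) * ∑ j ∈ Finset.Ico (0:Int) (beta - w), T l u w r h j)
    = ∑ w ∈ Finset.Ico (2:Int) mu, ∑ h ∈ Finset.Ico (2:Int) rho,
      ∑ u ∈ Finset.Ico (0:Int) (mu - w), ∑ j ∈ Finset.Ico (0:Int) (beta - w),
      ∑ l ∈ Finset.Ico (0:Int) (lam - h), ∑ r ∈ Finset.Ico (0:Int) (rho - h), T l u w r h j := by
  calc
    (∑ l ∈ Finset.Ico (0:Int) (lam - 2), ∑ u ∈ Finset.Ico (0:Int) (mu - 2),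
      ∑ w ∈ Finset.Ico (2:Int) (mu - u), ∑ r ∈ Finset.Ico (0:Int) (rho - 2),
      ∑ h ∈ Finset.Ico (2:Int) (rho - r),
        pvI (l + h < lam) * ∑ j ∈ Finset.Ico (0:Int) (beta - w), T l u w r h j)
      = ∑ l ∈ Finset.Ico (0:Int) (lam - 2), ∑ w ∈ Finset.Ico (2:Int) mu,
        ∑ u ∈ Finset.Ico (0:Int) (mu - w), ∑ r ∈ Finset.Ico (0:Int) (rho - 2),
        ∑ h ∈ Finset.Ico (2:Int) (rho - r),
          pvI (l + h < lam) * ∑ j ∈ Finset.Ico (0:Int) (beta - w), T l u w r h j :=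
        Finset.sum_congr rfl (fun l _ => pvTri mu _)
    _ = ∑ l ∈ Finset.Ico (0:Int) (lam - 2), ∑ w ∈ Finset.Ico (2:Int) mu,
        ∑ u ∈ Finset.Ico (0:Int) (mu - w), ∑ h ∈ Finset.Ico (2:Int) rho,
        ∑ r ∈ Finset.Ico (0:Int) (rho - h),
          pvI (l + h < lam) * ∑ j ∈ Finset.Ico (0:Int) (beta - w), T l u w r h j :=
        Finset.sum_congr rfl (fun l _ => Finset.sum_congr rfl (fun w _ =>
          Finset.sum_congr rfl (fun u _ => pvTri rho _)))
    _ = ∑ w ∈ Finset.Ico (2:Int) mu, ∑ l ∈ Finset.Ico (0:Int) (lam - 2),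
        ∑ u ∈ Finset.Ico (0:Int) (mu - w), ∑ h ∈ Finset.Ico (2:Int) rho,
        ∑ r ∈ Finset.Ico (0:Int) (rho - h),
          pvI (l + h < lam) * ∑ j ∈ Finset.Ico (0:Int) (beta - w), T l u w r h j :=
        Finset.sum_comm
    _ = ∑ w ∈ Finset.Ico (2:Int) mu, ∑ u ∈ Finset.Ico (0:Int) (mu - w),
        ∑ l ∈ Finset.Ico (0:Int) (lam - 2), ∑ h ∈ Finset.Ico (2:Int) rho,
        ∑ r ∈ Finset.Ico (0:Int) (rho - h),
          pvI (l + h < lam) * ∑ j ∈ Finset.Ico (0:Int) (beta - w), T l u w r h j :=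
        Finset.sum_congr rfl (fun w _ => Finset.sum_comm)
    _ = ∑ w ∈ Finset.Ico (2:Int) mu, ∑ u ∈ Finset.Ico (0:Int) (mu - w),
        ∑ h ∈ Finset.Ico (2:Int) rho, ∑ l ∈ Finset.Ico (0:Int) (lam - 2),
        ∑ r ∈ Finset.Ico (0:Int) (rho - h),
          pvI (l + h < lam) * ∑ j ∈ Finset.Ico (0:Int) (beta - w), T l u w r h j :=
        Finset.sum_congr rfl (fun w _ => Finset.sum_congr rfl (fun u _ => Finset.sum_comm))
    _ = ∑ w ∈ Finset.Ico (2:Int) mu, ∑ h ∈ Finset.Ico (2:Int) rho,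
        ∑ u ∈ Finset.Ico (0:Int) (mu - w), ∑ l ∈ Finset.Ico (0:Int) (lam - 2),
        ∑ r ∈ Finset.Ico (0:Int) (rho - h),
          pvI (l + h < lam) * ∑ j ∈ Finset.Ico (0:Int) (beta - w), T l u w r h j :=
        Finset.sum_congr rfl (fun w _ => Finset.sum_comm)
    _ = ∑ w ∈ Finset.Ico (2:Int) mu, ∑ h ∈ Finset.Ico (2:Int) rho,
        ∑ u ∈ Finset.Ico (0:Int) (mu - w), ∑ l ∈ Finset.Ico (0:Int) (lam - 2),
          pvI (l + h < lam) *
            ∑ r ∈ Finset.Ico (0:Int) (rho - h), ∑ j ∈ Finset.Ico (0:Int) (beta - w), T l u w r h j :=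
        Finset.sum_congr rfl (fun w _ => Finset.sum_congr rfl (fun h _ =>
          Finset.sum_congr rfl (fun u _ => Finset.sum_congr rfl (fun l _ =>
            (Finset.mul_sum _ _ _).symm))))
    _ = ∑ w ∈ Finset.Ico (2:Int) mu, ∑ h ∈ Finset.Ico (2:Int) rho,
        ∑ u ∈ Finset.Ico (0:Int) (mu - w), ∑ l ∈ Finset.Ico (0:Int) (lam - h),
        ∑ r ∈ Finset.Ico (0:Int) (rho - h), ∑ j ∈ Finset.Ico (0:Int) (beta - w), T l u w r h j :=
        Finset.sum_congr rfl (fun w _ => Finset.sum_congr rfl (fun h hh =>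
          Finset.sum_congr rfl (fun u _ =>
            pvLfix lam h (by simp only [Finset.mem_Ico] at hh; omega) _)))
    _ = ∑ w ∈ Finset.Ico (2:Int) mu, ∑ h ∈ Finset.Ico (2:Int) rho,
        ∑ u ∈ Finset.Ico (0:Int) (mu - w), ∑ l ∈ Finset.Ico (0:Int) (lam - h),
        ∑ j ∈ Finset.Ico (0:Int) (beta - w), ∑ r ∈ Finset.Ico (0:Int) (rho - h), T l u w r h j :=
        Finset.sum_congr rfl (fun w _ => Finset.sum_congr rfl (fun h _ =>
          Finset.sum_congr rfl (fun u _ => Finset.sum_congr rfl (fun l _ => Finset.sum_comm))))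
    _ = ∑ w ∈ Finset.Ico (2:Int) mu, ∑ h ∈ Finset.Ico (2:Int) rho,
        ∑ u ∈ Finset.Ico (0:Int) (mu - w), ∑ j ∈ Finset.Ico (0:Int) (beta - w),
        ∑ l ∈ Finset.Ico (0:Int) (lam - h), ∑ r ∈ Finset.Ico (0:Int) (rho - h), T l u w r h j :=
        Finset.sum_congr rfl (fun w _ => Finset.sum_congr rfl (fun h _ =>
          Finset.sum_congr rfl (fun u _ => Finset.sum_comm)))


noncomputable def pvA6 (L R B : List Char) (l1 u1 u2 r1 r2 : Int) : Int :=
  ∑ b1 ∈ Finset.Ico (u2 - u1) ((B.length : Int)),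
    pvI (PySem.List.pyGetD R r2 ' ' = PySem.List.pyGetD B b1 ' ') *
      (pvI (b1 - (u2 - u1) ≥ 0 ∧ l1 + (r2 - r1) < (L.length : Int)) *
        (pvI (PySem.List.pyGetD L (l1 + (r2 - r1)) ' ' = PySem.List.pyGetD B (b1 - (u2 - u1)) ' ') * 1))

noncomputable def pvA5 (L R B : List Char) (l1 u1 u2 r1 : Int) : Int :=
  ∑ r2 ∈ Finset.Ico (r1 + 2) ((R.length : Int)),
    pvI (PySem.List.pyGetD R r2 ' ' ∈ PySem.Set.ofList B) * pvA6 L R B l1 u1 u2 r1 r2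

noncomputable def pvA4 (L U R B : List Char) (l1 u1 u2 : Int) : Int :=
  ∑ r1 ∈ Finset.Ico (0:Int) ((R.length : Int) - 2),
    pvI (PySem.List.pyGetD U u2 ' ' = PySem.List.pyGetD R r1 ' ') * pvA5 L R B l1 u1 u2 r1

noncomputable def pvA3 (L U R B : List Char) (l1 u1 : Int) : Int :=
  ∑ u2 ∈ Finset.Ico (u1 + 2) ((U.length : Int)),
    pvI (PySem.List.pyGetD U u2 ' ' ∈ PySem.Set.ofList R) * pvA4 L U R B l1 u1 u2

noncomputable def pvA1 (L U R B : List Char) : Int :=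
  ∑ l1 ∈ Finset.Ico (0:Int) ((L.length : Int) - 2),
    pvI (PySem.List.pyGetD L l1 ' ' ∈ PySem.Set.ofList U) *
      ∑ u1 ∈ Finset.Ico (0:Int) ((U.length : Int) - 2),
        pvI (PySem.List.pyGetD L l1 ' ' = PySem.List.pyGetD U u1 ' ') * pvA3 L U R B l1 u1

noncomputable def pvG (L R B : List Char) (l1 r1 w : Int) : Int :=
  ∑ h ∈ Finset.Ico (2:Int) ((R.length : Int) - r1),
    pvI (l1 + h < (L.length : Int)) *
      ∑ j ∈ Finset.Ico (0:Int) ((B.length : Int) - w),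
        pvI (PySem.List.pyGetD R (r1 + h) ' ' = PySem.List.pyGetD B (w + j) ' ') *
          pvI (PySem.List.pyGetD L (l1 + h) ' ' = PySem.List.pyGetD B j ' ')

noncomputable def pvTT (L U R B : List Char) (l u w r h j : Int) : Int :=
  pvI (PySem.List.pyGetD L l ' ' = PySem.List.pyGetD U u ' ') *
    (pvI (PySem.List.pyGetD U (u + w) ' ' = PySem.List.pyGetD R r ' ') *
      (pvI (PySem.List.pyGetD R (r + h) ' ' = PySem.List.pyGetD B (w + j) ' ') *
        pvI (PySem.List.pyGetD L (l + h) ' ' = PySem.List.pyGetD B j ' ')))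

lemma pvA5_eq (L R B : List Char) (l1 u1 u2 r1 : Int) (ha : 0 ≤ u2 - u1) :
    pvA5 L R B l1 u1 u2 r1 = pvG L R B l1 r1 (u2 - u1) := by
  unfold pvA5 pvA6 pvG
  exact pvStepB L R B l1 (u2 - u1) r1 ha

lemma pvA3_eq (L U R B : List Char) (l1 u1 : Int) :
    pvA3 L U R B l1 u1
      = ∑ w ∈ Finset.Ico (2:Int) ((U.length : Int) - u1),
          ∑ r1 ∈ Finset.Ico (0:Int) ((R.length : Int) - 2),
            pvI (PySem.List.pyGetD U (u1 + w) ' ' = PySem.List.pyGetD R r1 ' ') *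
              pvG L R B l1 r1 w := by
  unfold pvA3 pvA4
  rw [Finset.sum_congr rfl (fun u2 hu2 =>
    congrArg (HMul.hMul (pvI (PySem.List.pyGetD U u2 ' ' ∈ PySem.Set.ofList R)))
      (Finset.sum_congr rfl (fun r1 _ =>
        congrArg (HMul.hMul (pvI (PySem.List.pyGetD U u2 ' ' = PySem.List.pyGetD R r1 ' ')))
          (pvA5_eq L R B l1 u1 u2 r1 (by simp only [Finset.mem_Ico] at hu2; omega)))))]
  exact pvStepU U R u1 (fun r1 w => pvG L R B l1 r1 w)

lemma pvPush (L U R B : List Char) (l1 : Int) :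
    ∑ u1 ∈ Finset.Ico (0:Int) ((U.length : Int) - 2),
        pvI (PySem.List.pyGetD L l1 ' ' = PySem.List.pyGetD U u1 ' ') *
          ∑ w ∈ Finset.Ico (2:Int) ((U.length : Int) - u1),
            ∑ r1 ∈ Finset.Ico (0:Int) ((R.length : Int) - 2),
              pvI (PySem.List.pyGetD U (u1 + w) ' ' = PySem.List.pyGetD R r1 ' ') *
                pvG L R B l1 r1 w
      = ∑ u1 ∈ Finset.Ico (0:Int) ((U.length : Int) - 2),
          ∑ w ∈ Finset.Ico (2:Int) ((U.length : Int) - u1),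
            ∑ r1 ∈ Finset.Ico (0:Int) ((R.length : Int) - 2),
              ∑ h ∈ Finset.Ico (2:Int) ((R.length : Int) - r1),
                pvI (l1 + h < (L.length : Int)) *
                  ∑ j ∈ Finset.Ico (0:Int) ((B.length : Int) - w),
                    pvTT L U R B l1 u1 w r1 h j := by
  refine Finset.sum_congr rfl (fun u1 _ => ?_)
  rw [Finset.mul_sum]
  refine Finset.sum_congr rfl (fun w _ => ?_)
  rw [Finset.mul_sum]
  refine Finset.sum_congr rfl (fun r1 _ => ?_)
  unfold pvG
  rw [← mul_assoc, Finset.mul_sum]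
  refine Finset.sum_congr rfl (fun h _ => ?_)
  rw [mul_left_comm]
  refine congrArg (HMul.hMul (pvI (l1 + h < (L.length : Int)))) ?_
  rw [Finset.mul_sum]
  refine Finset.sum_congr rfl (fun j _ => ?_)
  unfold pvTT
  ring

lemma pvTT_eq (L U R B : List Char) (l u w r h j : Int) :
    pvTT L U R B l u w r h j = pvT L U R B w h u j l r := by
  unfold pvTT pvT
  rw [pvI_comm (PySem.List.pyGetD U (u + w) ' ') (PySem.List.pyGetD R r ' '),
      show w + j = j + w from add_comm w j]
  ring

lemma pvMain (L U R B : List Char) : pvA1 L U R B = pvN L U R B := by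
  unfold pvA1
  calc
    (∑ l1 ∈ Finset.Ico (0:Int) ((L.length : Int) - 2),
      pvI (PySem.List.pyGetD L l1 ' ' ∈ PySem.Set.ofList U) *
        ∑ u1 ∈ Finset.Ico (0:Int) ((U.length : Int) - 2),
          pvI (PySem.List.pyGetD L l1 ' ' = PySem.List.pyGetD U u1 ' ') * pvA3 L U R B l1 u1)
      = ∑ l1 ∈ Finset.Ico (0:Int) ((L.length : Int) - 2),
          ∑ u1 ∈ Finset.Ico (0:Int) ((U.length : Int) - 2),
            pvI (PySem.List.pyGetD L l1 ' ' = PySem.List.pyGetD U u1 ' ') * pvA3 L U R B l1 u1 :=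
        Finset.sum_congr rfl (fun l1 _ =>
          pvGuardMem _ U 0 _ le_rfl (by omega) (fun u1 => pvA3 L U R B l1 u1))
    _ = ∑ l1 ∈ Finset.Ico (0:Int) ((L.length : Int) - 2),
        ∑ u1 ∈ Finset.Ico (0:Int) ((U.length : Int) - 2),
          pvI (PySem.List.pyGetD L l1 ' ' = PySem.List.pyGetD U u1 ' ') *
            ∑ w ∈ Finset.Ico (2:Int) ((U.length : Int) - u1),
              ∑ r1 ∈ Finset.Ico (0:Int) ((R.length : Int) - 2),
                pvI (PySem.List.pyGetD U (u1 + w) ' ' = PySem.List.pyGetD R r1 ' ') *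
                  pvG L R B l1 r1 w :=
        Finset.sum_congr rfl (fun l1 _ => Finset.sum_congr rfl (fun u1 _ =>
          congrArg (HMul.hMul (pvI (PySem.List.pyGetD L l1 ' ' = PySem.List.pyGetD U u1 ' ')))
            (pvA3_eq L U R B l1 u1)))
    _ = ∑ l1 ∈ Finset.Ico (0:Int) ((L.length : Int) - 2),
        ∑ u1 ∈ Finset.Ico (0:Int) ((U.length : Int) - 2),
          ∑ w ∈ Finset.Ico (2:Int) ((U.length : Int) - u1),
            ∑ r1 ∈ Finset.Ico (0:Int) ((R.length : Int) - 2),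
              ∑ h ∈ Finset.Ico (2:Int) ((R.length : Int) - r1),
                pvI (l1 + h < (L.length : Int)) *
                  ∑ j ∈ Finset.Ico (0:Int) ((B.length : Int) - w),
                    pvTT L U R B l1 u1 w r1 h j :=
        Finset.sum_congr rfl (fun l1 _ => pvPush L U R B l1)
    _ = ∑ w ∈ Finset.Ico (2:Int) ((U.length : Int)), ∑ h ∈ Finset.Ico (2:Int) ((R.length : Int)),
        ∑ u ∈ Finset.Ico (0:Int) ((U.length : Int) - w),
        ∑ j ∈ Finset.Ico (0:Int) ((B.length : Int) - w),
        ∑ l ∈ Finset.Ico (0:Int) ((L.length : Int) - h),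
        ∑ r ∈ Finset.Ico (0:Int) ((R.length : Int) - h), pvTT L U R B l u w r h j :=
        pvRearrange (L.length : Int) (U.length : Int) (R.length : Int) (B.length : Int)
          (fun l u w r h j => pvTT L U R B l u w r h j)
    _ = pvN L U R B := by
        unfold pvN
        exact Finset.sum_congr rfl (fun w _ => Finset.sum_congr rfl (fun h _ =>
          Finset.sum_congr rfl (fun u _ => Finset.sum_congr rfl (fun j _ =>
            Finset.sum_congr rfl (fun l _ => Finset.sum_congr rfl (fun r _ =>
              pvTT_eq L U R B l u w r h j))))))

theorem pvA_eq_pvN (left up right bottom : String) :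
    sumOfCombinations left up right bottom =
      pvN left.toList up.toList right.toList bottom.toList := by
  simp only [sumOfCombinations, pvIte, PySem.List.foldl_add, zero_add, pvSumIco]
  exact pvMain left.toList up.toList right.toList bottom.toList

-- ===== VERDICT (by name: the statement is the Claim_ definition above) =====
theorem sumOfCombinations_spec : Claim_equal_sumOfCombinations := by
  intro left up right bottom _
  unfold Spec_sumOfCombinations
  rw [pvA_eq_pvN, pvB_eq_pvN]
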